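-- pv_equiv track=rewrite | github.com/pypi-data/pypi-mirror-133 | packages/dsalgo/dsalgo-0.1.0-py3-none-any.whl/dsalgo/number_theory/prime.py | greatest_prime_factor
-- ===== SOURCE A (Python) =====
-- def sieve_of_eratosthenes(n: int) -> list[bool]:
--     assert n > 1
--     is_prime = [True] * n
--     is_prime[0] = is_prime[1] = False
--     i = 0
--     while i * i < n - 1:
--         i += 1
--         if not is_prime[i]:
--             continue
--         for j in range(i * i, n, i):
--             is_prime[j] = False
--     return is_prime
--
-- def least_prime_factor(n: int) -> list[int]:
--     is_prime = sieve_of_eratosthenes(n)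
--     lpf = list(range(n))
--     lpf[1] = 0
--     i = 0
--     while i * i < n - 1:
--         i += 1
--         if not is_prime[i]:
--             continue
--         for j in range(i * i, n, i):
--             if lpf[j] == j:
--                 lpf[j] = i
--     return lpf
--
-- def greatest_prime_factor(n: int) -> list[int]:
--     lpf = least_prime_factor(n)
--     gpf = list(range(n))
--     gpf[1] = 0
--     for i in range(2, n):
--         if lpf[i] == i:
--             continue
--         gpf[i] = gpf[i // lpf[i]]
--     return gpf
-- ===== SOURCE B (Python) =====
-- def greatest_prime_factor(n: int) -> list[int]:
--     assert n > 1
--     is_prime = [True] * n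
--     is_prime[0] = is_prime[1] = False
--     for p in range(2, n):
--         if is_prime[p]:
--             for j in range(p * p, n, p):
--                 is_prime[j] = False
--     gpf = [0] * n
--     for p in range(2, n):
--         if is_prime[p]:
--             for j in range(p, n, p):
--                 gpf[j] = p
--     return gpf
-- ===== Notes on version B (the rewrite author's own statement) =====
-- stated objective: simpler
-- what changed: B drops the least-prime-factor table and the division recurrence gpf[i]=gpf[i//lpf[i]] entirely: after one sieve it writes p onto every multiple of each prime p in ascending order, so the greatest prime factor is what overwrites last.
import Mathlib
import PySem

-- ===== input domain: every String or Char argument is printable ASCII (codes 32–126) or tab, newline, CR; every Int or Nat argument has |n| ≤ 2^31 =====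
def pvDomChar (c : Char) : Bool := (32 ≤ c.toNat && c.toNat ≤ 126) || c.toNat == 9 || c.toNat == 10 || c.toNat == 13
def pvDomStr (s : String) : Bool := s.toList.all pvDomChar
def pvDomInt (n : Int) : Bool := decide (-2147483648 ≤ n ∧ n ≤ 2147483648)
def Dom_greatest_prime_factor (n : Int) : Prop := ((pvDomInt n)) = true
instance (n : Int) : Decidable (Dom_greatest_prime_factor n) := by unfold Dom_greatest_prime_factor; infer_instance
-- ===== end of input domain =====

-- B replaces A's least-prime-factor table and division recurrence gpf[i]=gpf[i//lpf[i]] by a single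
-- ascending overwrite pass: after a sieve, every prime p writes itself onto all its multiples, so the
-- greatest prime factor is written last (objective: simpler).

-- ===== PORT A =====
-- Indices proved in range under Pre_ (n > 1); List.getD/List.set realize Python's in-range xs[i] / xs[i]=v.

-- 'for j in range(i*i, n, i): is_prime[j] = False'
def pvSieveMark (nn i : Nat) (arr : List Bool) : List Bool :=
  (PySem.List.pyRange ((i : Int) * i) nn i).foldl (fun a j => a.set j.toNat false) arr

-- 'while i*i < n-1: i += 1; if not is_prime[i]: continue; <mark>'
def pvSieveLoopA (nn i : Nat) (arr : List Bool) : List Bool :=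
  if h : i * i < nn - 1 then
    if arr.getD (i + 1) false = false then pvSieveLoopA nn (i + 1) arr
    else pvSieveLoopA nn (i + 1) (pvSieveMark nn (i + 1) arr)
  else arr
termination_by nn - i
decreasing_by
  all_goals
    rcases Nat.eq_zero_or_pos i with h0 | h0
    · subst h0; omega
    · have := Nat.le_mul_of_pos_left i h0; omega

def pvSieveA (nn : Nat) : List Bool :=
  pvSieveLoopA nn 0 (((List.replicate nn true).set 0 false).set 1 false)

-- 'for j in range(i*i, n, i): if lpf[j] == j: lpf[j] = i'
def pvLpfMark (nn i : Nat) (lpf : List Int) : List Int :=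
  (PySem.List.pyRange ((i : Int) * i) nn i).foldl
    (fun a j => if a.getD j.toNat 0 = j then a.set j.toNat (i : Int) else a) lpf

def pvLpfLoop (nn : Nat) (isp : List Bool) (i : Nat) (lpf : List Int) : List Int :=
  if h : i * i < nn - 1 then
    if isp.getD (i + 1) false = false then pvLpfLoop nn isp (i + 1) lpf
    else pvLpfLoop nn isp (i + 1) (pvLpfMark nn (i + 1) lpf)
  else lpf
termination_by nn - i
decreasing_by
  all_goals
    rcases Nat.eq_zero_or_pos i with h0 | h0
    · subst h0; omega
    · have := Nat.le_mul_of_pos_left i h0; omega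

def pvLeastPrimeFactor (nn : Nat) : List Int :=
  pvLpfLoop nn (pvSieveA nn) 0 ((PySem.List.pyRange 0 nn 1).set 1 0)

def greatest_prime_factor (n : Int) : List Int :=
  let nn := n.toNat
  let lpf := pvLeastPrimeFactor nn
  (PySem.List.pyRange 2 n 1).foldl
    (fun g i =>
      if lpf.getD i.toNat 0 = i then g
      else g.set i.toNat (g.getD (PySem.Int.floordiv i (lpf.getD i.toNat 0)).toNat 0))
    ((PySem.List.pyRange 0 nn 1).set 1 0)

-- ===== PORT B =====
def greatest_prime_factor_alt (n : Int) : List Int :=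
  let isp :=
    (PySem.List.pyRange 2 n 1).foldl
      (fun a p =>
        if a.getD p.toNat false then
          (PySem.List.pyRange (p * p) n p).foldl (fun a2 j => a2.set j.toNat false) a
        else a)
      (((List.replicate n.toNat true).set 0 false).set 1 false)
  (PySem.List.pyRange 2 n 1).foldl
    (fun g p =>
      if isp.getD p.toNat false then
        (PySem.List.pyRange p n p).foldl (fun g2 j => g2.set j.toNat p) g
      else g)
    (List.replicate n.toNat (0 : Int))

-- ===== PRECONDITION & SPEC =====
-- A executes 'assert n > 1' (AssertionError for n ≤ 1): exactly those inputs are excluded.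
def Pre_greatest_prime_factor (n : Int) : Prop := 1 < n
instance (n : Int) : Decidable (Pre_greatest_prime_factor n) := by
  unfold Pre_greatest_prime_factor; infer_instance

def pvWitness_greatest_prime_factor : Int := 12

def Spec_greatest_prime_factor (n : Int) (out : List Int) : Prop := out = greatest_prime_factor_alt n
instance (n : Int) (out : List Int) : Decidable (Spec_greatest_prime_factor n out) := by
  unfold Spec_greatest_prime_factor; infer_instance

-- ===== CLAIM (what is proved, stated in full; the proofs are below) =====
def Claim_equal_greatest_prime_factor : Prop :=
  ∀ (n : Int), Dom_greatest_prime_factor n → Pre_greatest_prime_factor n →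
    Spec_greatest_prime_factor n (greatest_prime_factor n)

-- ===== LEMMAS AND PROOFS =====

theorem pv_len_foldl_set {α : Type} (js : List Int) (v : α) (arr : List α) :
    (js.foldl (fun a j => a.set j.toNat v) arr).length = arr.length := by
  induction js generalizing arr with
  | nil => rfl
  | cons j t ih => simp [List.foldl_cons, ih]

theorem pv_getD_foldl_set {α : Type} (js : List Int) (v d : α) (arr : List α) (k : Nat) :
    (js.foldl (fun a j => a.set j.toNat v) arr).getD k d =
      if (∃ j ∈ js, j.toNat = k) ∧ k < arr.length then v else arr.getD k d := by
  induction js generalizing arr with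
  | nil => simp
  | cons j t ih =>
    rw [List.foldl_cons, ih]
    by_cases hk : k = j.toNat
    · subst hk
      by_cases hlen : j.toNat < arr.length
      · by_cases hmem : ∃ x ∈ t, x.toNat = j.toNat
        · simp [hmem, hlen]
        · simp only [List.length_set, hmem, hlen, and_true, List.mem_cons]
          simp [List.getD_eq_getElem?_getD, hlen]
      · simp only [List.length_set]
        rw [if_neg (by tauto), if_neg (by tauto)]
        simp [List.set_eq_of_length_le (by omega : arr.length ≤ j.toNat)]
    · have hset : (arr.set j.toNat v).getD k d = arr.getD k d := by
        simp [List.getD_eq_getElem?_getD, List.getElem?_set_ne (by omega : j.toNat ≠ k)]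
      have hiff : (∃ x ∈ j :: t, x.toNat = k) ↔ (∃ x ∈ t, x.toNat = k) := by
        constructor
        · rintro ⟨x, hx, hx2⟩
          rcases List.mem_cons.mp hx with rfl | hx'
          · exact absurd hx2.symm hk
          · exact ⟨x, hx', hx2⟩
        · rintro ⟨x, hx, hx2⟩
          exact ⟨x, List.mem_cons.mpr (Or.inr hx), hx2⟩
      simp only [List.length_set, hset, hiff]

theorem pv_len_foldl_setif (js : List Int) (v : Int) (arr : List Int) :
    (js.foldl (fun a j => if a.getD j.toNat 0 = j then a.set j.toNat v else a) arr).length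
      = arr.length := by
  induction js generalizing arr with
  | nil => rfl
  | cons j t ih =>
    rw [List.foldl_cons, ih]
    split <;> simp

theorem pv_getD_foldl_setif (js : List Int) (v : Int) (arr : List Int) (k : Nat)
    (hpos : ∀ j ∈ js, 0 ≤ j) (hnd : (js.map Int.toNat).Nodup) :
    (js.foldl (fun a j => if a.getD j.toNat 0 = j then a.set j.toNat v else a) arr).getD k 0 =
      if (k : Int) ∈ js ∧ k < arr.length then
        (if arr.getD k 0 = (k : Int) then v else arr.getD k 0)
      else arr.getD k 0 := by
  induction js generalizing arr with
  | nil => simp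
  | cons j t ih =>
    obtain ⟨m, rfl⟩ : ∃ m : Nat, j = (m : Int) := ⟨j.toNat, by
      have := hpos j (List.mem_cons_self ..); omega⟩
    rw [List.foldl_cons]
    rw [List.map_cons] at hnd
    have hndt : (t.map Int.toNat).Nodup := (List.nodup_cons.mp hnd).2
    have hjnot : ((m : Int).toNat) ∉ t.map Int.toNat := (List.nodup_cons.mp hnd).1
    rw [Int.toNat_natCast] at hjnot
    rw [ih _ (fun x hx => hpos x (List.mem_cons.mpr (Or.inr hx))) hndt]
    simp only [Int.toNat_natCast]
    by_cases hk : k = m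
    · subst hk
      have hknt : (k : Int) ∉ t := fun hmem => hjnot (by simpa using List.mem_map_of_mem hmem)
      rw [if_neg (by tauto)]
      by_cases hlen : k < arr.length
      · have hcond : ((if arr.getD k 0 = (k : Int) then arr.set k v else arr).getD k 0)
            = if arr.getD k 0 = (k : Int) then v else arr.getD k 0 := by
          split
          · simp [List.getD_eq_getElem?_getD, List.getElem?_set_self hlen]
          · rfl
        rw [hcond]
        simp [hlen]
      · have h2 : ((if arr.getD k 0 = (k : Int) then arr.set k v else arr).getD k 0)
            = arr.getD k 0 := by
          split
          · simp [List.getD_eq_getElem?_getD, hlen]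
          · rfl
        rw [h2, if_neg (by tauto)]
    · have harr' : ((if arr.getD (m : Nat) 0 = (m : Int) then arr.set m v else arr).getD k 0)
          = arr.getD k 0 := by
        split
        · simp [List.getD_eq_getElem?_getD, List.getElem?_set_ne (by omega : (m : Nat) ≠ k)]
        · rfl
      have hlen' : ((if arr.getD (m : Nat) 0 = (m : Int) then arr.set m v else arr)).length
          = arr.length := by split <;> simp
      have hmemiff : ((k : Int) ∈ (m : Int) :: t) ↔ ((k : Int) ∈ t) := by
        constructor
        · intro h
          rcases List.mem_cons.mp h with h' | h'
          · exact absurd (by omega : k = m) hk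
          · exact h'
        · exact fun h => List.mem_cons.mpr (Or.inr h)
      simp only [harr', hlen', hmemiff]

theorem pv_mem_pyRange_toNat (a s : Int) (nn : Nat) (k : Nat) (ha : 0 ≤ a) (hs : 0 < s) :
    (∃ j ∈ PySem.List.pyRange a nn s, j.toNat = k) ↔
      ((k : Int) ∈ PySem.List.pyRange a nn s) := by
  constructor
  · rintro ⟨j, hj, rfl⟩
    have := (PySem.List.mem_pyRange_iff_of_pos hs j).mp hj
    have hj0 : 0 ≤ j := le_trans ha this.1
    rwa [Int.toNat_of_nonneg hj0]
  · intro h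
    exact ⟨k, h, by simp⟩

theorem pv_pos_pyRange (a s : Int) (b : Int) (ha : 0 ≤ a) (hs : 0 < s) :
    ∀ j ∈ PySem.List.pyRange a b s, 0 ≤ j := by
  intro j hj
  exact le_trans ha ((PySem.List.mem_pyRange_iff_of_pos hs j).mp hj).1

theorem pv_nodup_pyRange_toNat (a b s : Int) (ha : 0 ≤ a) (hs : 0 < s) :
    ((PySem.List.pyRange a b s).map Int.toNat).Nodup := by
  rw [PySem.List.pyRange_of_pos a b hs, List.map_map]
  apply List.Nodup.map_on _ List.nodup_range
  intro x _ y _ hxy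
  simp only [Function.comp] at hxy
  have hx : ((a + s * x).toNat : Int) = a + s * x := Int.toNat_of_nonneg (by positivity)
  have hy : ((a + s * y).toNat : Int) = a + s * y := Int.toNat_of_nonneg (by positivity)
  have : a + s * (x:Int) = a + s * y := by
    rw [← hx, ← hy]; exact congrArg (fun t : Nat => (t : Int)) hxy
  have : (x : Int) = y := by
    have := mul_left_cancel₀ (ne_of_gt hs) (by omega : s * (x:Int) = s * y)
    exact this
  exact_mod_cast this

-- divisibility over the cast: for i ≥ 1, (i:Int) ∣ (k:Int) - i*i ↔ i ∣ k
theorem pv_dvd_shift (i k : Nat) :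
    ((i : Int) ∣ (k : Int) - (i : Int) * i) ↔ (i ∣ k) := by
  constructor
  · intro h
    have h2 : (i : Int) ∣ ((k : Int) - (i:Int)*i) + (i:Int)*i :=
      dvd_add h (Dvd.intro _ rfl)
    rw [sub_add_cancel] at h2
    exact_mod_cast h2
  · intro h
    have h1 : (i : Int) ∣ (k : Int) := by exact_mod_cast h
    exact dvd_sub h1 (Dvd.intro _ rfl)

def pvGB : Nat → Nat → Nat
  | 0, _ => 0
  | m + 1, k => if Nat.Prime m ∧ m ∣ k ∧ m ≤ k then m else pvGB m k

theorem pvGB_stab (m k : Nat) (h : k < m) : pvGB m k = pvGB (k + 1) k := by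
  induction m with
  | zero => omega
  | succ m ih =>
    rcases Nat.lt_or_ge k m with h' | h'
    · rw [pvGB, if_neg (by rintro ⟨_, _, hle⟩; omega), ih h']
    · have : m = k := by omega
      subst this; rfl

theorem pvGB_max (m k q : Nat) (hq : q < m) (hp : Nat.Prime q) (hd : q ∣ k) (hle : q ≤ k) :
    q ≤ pvGB m k := by
  induction m with
  | zero => omega
  | succ m ih =>
    rw [pvGB]
    split
    · rcases Nat.lt_or_ge q m with h' | h'
      · omega
      · omega
    · rcases Nat.lt_or_ge q m with h' | h'
      · exact ih h'
      · have : q = m := by omega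
        subst this; tauto

theorem pvGB_mem (m k : Nat) :
    pvGB m k = 0 ∨ (Nat.Prime (pvGB m k) ∧ pvGB m k ∣ k ∧ pvGB m k ≤ k ∧ pvGB m k < m) := by
  induction m with
  | zero => exact Or.inl rfl
  | succ m ih =>
    rw [pvGB]
    split
    · rename_i h
      exact Or.inr ⟨h.1, h.2.1, h.2.2, by omega⟩
    · rcases ih with h | h
      · exact Or.inl h
      · exact Or.inr ⟨h.1, h.2.1, h.2.2.1, by omega⟩

theorem pvGB_eq_of (m k g : Nat) (hp : Nat.Prime g) (hd : g ∣ k) (hle : g ≤ k) (hlt : g < m)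
    (hmax : ∀ q, q < m → Nat.Prime q → q ∣ k → q ≤ k → q ≤ g) : pvGB m k = g := by
  have h1 : g ≤ pvGB m k := pvGB_max m k g hlt hp hd hle
  rcases pvGB_mem m k with h | h
  · omega
  · exact le_antisymm (hmax _ h.2.2.2 h.1 h.2.1 h.2.2.1) h1

theorem pv_prime_of_no (k : Nat) (h2 : 2 ≤ k)
    (h : ∀ q, Nat.Prime q → q ∣ k → q * q ≤ k → False) : Nat.Prime k := by
  by_contra hnp
  exact h k.minFac (Nat.minFac_prime (by omega)) (Nat.minFac_dvd k)
    (by simpa [pow_two] using Nat.minFac_sq_le_self (by omega : 0 < k) hnp)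

theorem pv_prime_no_small (k q : Nat) (hk : Nat.Prime k) (hq : Nat.Prime q) (hd : q ∣ k)
    (hsq : q * q ≤ k) : False := by
  rcases (Nat.Prime.eq_one_or_self_of_dvd hk q hd) with h | h
  · exact hq.one_lt.ne' h
  · subst h
    have := hk.two_le
    nlinarith

theorem pvGB_prime (k : Nat) (hk : Nat.Prime k) : pvGB (k + 1) k = k :=
  pvGB_eq_of _ _ _ hk dvd_rfl le_rfl (by omega) (fun q _ _ _ hle => hle)

theorem pvGB_comp (k : Nat) (h2 : 2 ≤ k) (hnp : ¬Nat.Prime k) :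
    pvGB (k + 1) k = pvGB (k / k.minFac + 1) (k / k.minFac) := by
  set q0 := k.minFac with hq0
  have hq0p : Nat.Prime q0 := Nat.minFac_prime (by omega)
  have hq02 := hq0p.two_le
  have hq0d : q0 ∣ k := Nat.minFac_dvd k
  have hq0sq : q0 * q0 ≤ k := by simpa [pow_two] using Nat.minFac_sq_le_self (by omega : 0 < k) hnp
  set d := k / q0 with hd
  have hdq : d * q0 = k := Nat.div_mul_cancel hq0d
  have hd2 : q0 ≤ d := (Nat.le_div_iff_mul_le hq0p.pos).mpr hq0sq
  have hdd : d ∣ k := ⟨q0, hdq.symm⟩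
  have hdlt : d < k := Nat.div_lt_self (by omega) hq0p.one_lt
  set g := pvGB (k + 1) k with hg
  have hgmin : q0 ≤ g := pvGB_max _ _ _ (by omega) hq0p hq0d (Nat.le_of_dvd (by omega) hq0d)
  rcases pvGB_mem (k + 1) k with h0 | ⟨hgp, hgd, hgle, _⟩
  · exfalso; have := hq0p.two_le; omega
  have hgdvd_d : g ∣ d := by
    by_cases hgq : g = q0
    · -- g is also the least prime factor; show q0 divides d via d's least prime factor
      have hd2' : 2 ≤ d := le_trans hq0p.two_le hd2
      have hq1p : Nat.Prime d.minFac := Nat.minFac_prime (by omega)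
      have hq1d : d.minFac ∣ k := dvd_trans (Nat.minFac_dvd d) hdd
      have h1 : d.minFac ≤ g :=
        pvGB_max _ _ _ (by have := Nat.le_of_dvd (by omega) hq1d; omega) hq1p hq1d
          (Nat.le_of_dvd (by omega) hq1d)
      have h2' : q0 ≤ d.minFac := Nat.minFac_le_of_dvd hq1p.two_le hq1d
      have : d.minFac = q0 := by omega
      rw [hgq, ← this]
      exact Nat.minFac_dvd d
    · have hcop : Nat.Coprime g q0 := (Nat.coprime_primes hgp hq0p).mpr hgq
      have hk' : g ∣ q0 * d := by rw [Nat.mul_comm q0 d, hdq]; exact hgd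
      exact hcop.dvd_of_dvd_mul_left hk'
  apply (pvGB_eq_of _ _ _ hgp hgdvd_d (Nat.le_of_dvd (by omega) hgdvd_d) _ _).symm
  · have := Nat.le_of_dvd (by omega) hgdvd_d; omega
  · intro q hq hqp hqd hqle
    exact pvGB_max _ _ _ (by omega) hqp (dvd_trans hqd hdd)
      (le_trans hqle (by omega))

def pvNoQ (i k : Nat) : Prop := ∀ q, q ≤ i → ¬(Nat.Prime q ∧ q ∣ k ∧ q * q ≤ k)

theorem pvNoQ_succ (i k : Nat) :
    pvNoQ (i + 1) k ↔ pvNoQ i k ∧ ¬(Nat.Prime (i + 1) ∧ (i + 1) ∣ k ∧ (i + 1) * (i + 1) ≤ k) := by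
  constructor
  · intro h
    exact ⟨fun q hq => h q (by omega), h (i + 1) le_rfl⟩
  · rintro ⟨h1, h2⟩ q hq
    rcases Nat.lt_or_ge q (i + 1) with h' | h'
    · exact h1 q (by omega)
    · have hq' : q = i + 1 := by omega
      subst hq'; exact h2

-- entry characterization of one sieve marking pass (shared shape of A's and B's inner loop)
theorem pv_mark_getD (nn p k : Nat) (arr : List Bool) (hp : 0 < p) (hlen : arr.length = nn) :
    ((PySem.List.pyRange ((p : Int) * p) nn p).foldl (fun a j => a.set j.toNat false) arr).getD k false
      = if p * p ≤ k ∧ k < nn ∧ p ∣ k then false else arr.getD k false := by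
  rw [pv_getD_foldl_set]
  rw [hlen]
  congr 1
  rw [eq_iff_iff]
  rw [pv_mem_pyRange_toNat _ _ _ _ (by positivity) (by exact_mod_cast hp)]
  rw [PySem.List.mem_pyRange_iff_of_pos (by exact_mod_cast hp)]
  constructor
  · rintro ⟨⟨h1, h2, h3⟩, _⟩
    refine ⟨by exact_mod_cast h1, by exact_mod_cast h2, ?_⟩
    exact (pv_dvd_shift p k).mp h3
  · rintro ⟨h1, h2, h3⟩
    exact ⟨⟨by exact_mod_cast h1, by exact_mod_cast h2, (pv_dvd_shift p k).mpr h3⟩, by omega⟩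

def pvInvS (nn i : Nat) (arr : List Bool) : Prop :=
  arr.length = nn ∧ ∀ k, k < nn → (arr.getD k false = true ↔ 2 ≤ k ∧ pvNoQ i k)

-- a number with an untruthed entry is not prime; one with a truthed entry and in-window is prime
theorem pv_small_q (i k : Nat) (h2 : 2 ≤ k) (hk : k ≤ i * i + 1) (hno : pvNoQ i k) :
    Nat.Prime k := by
  apply pv_prime_of_no k h2
  intro q hqp hqd hqsq
  have hqk : q ≤ k := Nat.le_of_dvd (by omega) hqd
  have hqne : q ≠ k := by
    rintro rfl
    nlinarith
  have hq2 := hqp.two_le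
  have hqi : q ≤ i := by
    rcases Nat.lt_or_ge i q with hgt | hle
    · exfalso
      have h1 : (i + 1) * (i + 1) ≤ q * q := Nat.mul_le_mul (by omega) (by omega)
      nlinarith
    · exact hle
  exact hno q hqi ⟨hqp, hqd, hqsq⟩

theorem pv_entry_prime (i k : Nat) (hk : 2 ≤ k) (hki : k ≤ i + 1) (hno : pvNoQ i k) :
    Nat.Prime k := by
  apply pv_prime_of_no k hk
  intro q hqp hqd hqsq
  have hqk : q ≤ k := Nat.le_of_dvd (by omega) hqd
  have hq2 := hqp.two_le
  have hqne : q ≠ k := by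
    rintro rfl
    nlinarith
  exact hno q (by omega) ⟨hqp, hqd, hqsq⟩

theorem pv_not_prime_of_no (i k : Nat) (hk : ¬(2 ≤ k ∧ pvNoQ i k)) : ¬ Nat.Prime (k) := by
  intro hp
  apply hk
  refine ⟨hp.two_le, fun q hq ⟨hqp, hqd, hqsq⟩ => pv_prime_no_small k q hp hqp hqd hqsq⟩

theorem pvSieveLoopA_inv (nn i : Nat) (arr : List Bool) (hnn : 2 ≤ nn) (hinv : pvInvS nn i arr) :
    ∀ k, k < nn → ((pvSieveLoopA nn i arr).getD k false = true ↔ Nat.Prime k) := by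
  induction i, arr using pvSieveLoopA.induct nn with
  | case1 i arr h hskip ih =>
    -- is_prime[i+1] is false: skip
    rw [pvSieveLoopA, dif_pos h, if_pos hskip]
    apply ih
    obtain ⟨hlen, hch⟩ := hinv
    refine ⟨hlen, fun k hk => ?_⟩
    rw [hch k hk, pvNoQ_succ]
    have hi1 : i + 1 < nn := by
      rcases Nat.eq_zero_or_pos i with rfl | hp
      · omega
      · have := Nat.le_mul_of_pos_left i hp; omega
    have hnp : ¬ Nat.Prime (i + 1) := by
      apply pv_not_prime_of_no i
      intro hc
      have := (hch (i + 1) hi1).mpr hc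
      rw [hskip] at this
      exact Bool.false_ne_true this
    tauto
  | case2 i arr h hmark ih =>
    rw [pvSieveLoopA, dif_pos h, if_neg hmark]
    apply ih
    obtain ⟨hlen, hch⟩ := hinv
    have hi1 : i + 1 < nn := by
      rcases Nat.eq_zero_or_pos i with rfl | hp
      · omega
      · have := Nat.le_mul_of_pos_left i hp; omega
    have htrue : arr.getD (i + 1) false = true := by
      cases hv : arr.getD (i + 1) false
      · exact absurd hv hmark
      · rfl
    have hcond := (hch (i + 1) hi1).mp htrue
    have hp1 : Nat.Prime (i + 1) := pv_entry_prime i (i + 1) hcond.1 le_rfl hcond.2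
    constructor
    · unfold pvSieveMark
      rw [pv_len_foldl_set, hlen]
    · intro k hk
      unfold pvSieveMark
      rw [pv_mark_getD nn (i + 1) k arr (by omega) hlen]
      split
      · rename_i hc
        simp only [Bool.false_eq_true, false_iff]
        rintro ⟨-, hnoq⟩
        exact hnoq (i + 1) le_rfl ⟨hp1, hc.2.2, hc.1⟩
      · rename_i hc
        rw [hch k hk, pvNoQ_succ]
        constructor
        · rintro ⟨h2, hno⟩
          refine ⟨h2, hno, ?_⟩
          rintro ⟨-, hd, hsq⟩
          exact hc ⟨hsq, hk, hd⟩
        · rintro ⟨h2, hno, -⟩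
          exact ⟨h2, hno⟩
  | case3 i arr h =>
    rw [pvSieveLoopA, dif_neg h]
    obtain ⟨hlen, hch⟩ := hinv
    intro k hk
    rw [hch k hk]
    constructor
    · rintro ⟨h2, hno⟩
      exact pv_small_q i k h2 (by omega) hno
    · intro hp
      refine ⟨hp.two_le, fun q hq ⟨hqp, hqd, hqsq⟩ => pv_prime_no_small k q hp hqp hqd hqsq⟩

theorem pvSieveA_prime (nn : Nat) (hnn : 2 ≤ nn) :
    ∀ k, k < nn → ((pvSieveA nn).getD k false = true ↔ Nat.Prime k) := by
  apply pvSieveLoopA_inv nn 0 _ hnn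
  constructor
  · simp
  · intro k hk
    have hnoq : pvNoQ 0 k := by
      rintro q hq ⟨hqp, -, -⟩
      have := hqp.two_le; omega
    rcases Nat.lt_or_ge k 2 with h2 | h2
    · have he : (((List.replicate nn true).set 0 false).set 1 false).getD k false = false := by
        interval_cases k <;>
          simp [List.getD_eq_getElem?_getD, (by omega : 0 < nn), (by omega : 1 < nn)]
      rw [he]
      simp only [Bool.false_eq_true, false_iff]
      rintro ⟨hc, -⟩
      omega
    · have he : (((List.replicate nn true).set 0 false).set 1 false).getD k false = true := by
        rw [List.getD_eq_getElem?_getD, List.getElem?_set_ne (by omega : (1 : Nat) ≠ k),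
          List.getElem?_set_ne (by omega : (0 : Nat) ≠ k)]
        simp [hk]
      rw [he]
      simp [h2, hnoq]

-- least prime q ≤ i with q ∣ k and q*q ≤ k
def pvLQ (i k : Nat) : Option Nat :=
  match i with
  | 0 => none
  | i + 1 =>
    match pvLQ i k with
    | some q => some q
    | none => if Nat.Prime (i + 1) ∧ (i + 1) ∣ k ∧ (i + 1) * (i + 1) ≤ k then some (i + 1) else none

theorem pvLQ_none_iff (i k : Nat) : pvLQ i k = none ↔ pvNoQ i k := by
  induction i with
  | zero =>
    simp only [pvLQ, true_iff]
    rintro q hq ⟨hp, -, -⟩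
    have := hp.two_le; omega
  | succ i ih =>
    rw [pvLQ]
    cases h : pvLQ i k with
    | some q =>
      simp only [reduceCtorEq, false_iff]
      intro hno
      rw [pvNoQ_succ] at hno
      have h2 := ih.mpr hno.1
      rw [h2] at h
      simp at h
    | none =>
      rw [pvNoQ_succ, ← ih]
      by_cases hc : Nat.Prime (i + 1) ∧ (i + 1) ∣ k ∧ (i + 1) * (i + 1) ≤ k
      · simp [hc, h]
      · simp [hc, h]

theorem pvLQ_some_min (i k q : Nat) (h : pvLQ i k = some q) :
    Nat.Prime q ∧ q ∣ k ∧ q * q ≤ k ∧ q ≤ i ∧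
      (∀ r, Nat.Prime r → r ∣ k → r * r ≤ k → q ≤ r) := by
  induction i with
  | zero => simp [pvLQ] at h
  | succ i ih =>
    rw [pvLQ] at h
    cases h' : pvLQ i k with
    | some q' =>
      rw [h'] at h
      obtain rfl : q' = q := by injection h
      obtain ⟨h1, h2, h3, h4, h5⟩ := ih h'
      exact ⟨h1, h2, h3, by omega, h5⟩
    | none =>
      rw [h'] at h
      by_cases hc : Nat.Prime (i + 1) ∧ (i + 1) ∣ k ∧ (i + 1) * (i + 1) ≤ k
      · rw [if_pos hc] at h
        obtain rfl : i + 1 = q := by injection h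
        refine ⟨hc.1, hc.2.1, hc.2.2, le_rfl, ?_⟩
        intro r hr hrd hrsq
        by_contra hlt
        exact ((pvLQ_none_iff i k).mp h') r (by omega) ⟨hr, hrd, hrsq⟩
      · rw [if_neg hc] at h
        simp at h

def pvLpfModel (i k : Nat) : Int :=
  match pvLQ i k with
  | some q => (q : Int)
  | none => if k = 1 then 0 else (k : Int)

def pvInvL (nn i : Nat) (lpf : List Int) : Prop :=
  lpf.length = nn ∧ ∀ k, k < nn → lpf.getD k 0 = pvLpfModel i k

theorem pv_lmark_getD (nn p k : Nat) (lpf : List Int) (hp : 0 < p) (hlen : lpf.length = nn) :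
    (pvLpfMark nn p lpf).getD k 0 =
      if p * p ≤ k ∧ k < nn ∧ p ∣ k then
        (if lpf.getD k 0 = (k : Int) then (p : Int) else lpf.getD k 0)
      else lpf.getD k 0 := by
  unfold pvLpfMark
  rw [pv_getD_foldl_setif _ _ _ _
    (pv_pos_pyRange _ _ _ (by positivity) (by exact_mod_cast hp))
    (pv_nodup_pyRange_toNat _ _ _ (by positivity) (by exact_mod_cast hp))]
  rw [hlen]
  have hmem : ((k : Int) ∈ PySem.List.pyRange ((p : Int) * p) nn p) ↔ (p * p ≤ k ∧ k < nn ∧ p ∣ k) := by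
    rw [PySem.List.mem_pyRange_iff_of_pos (by exact_mod_cast hp)]
    constructor
    · rintro ⟨h1, h2, h3⟩
      exact ⟨by exact_mod_cast h1, by exact_mod_cast h2, (pv_dvd_shift p k).mp h3⟩
    · rintro ⟨h1, h2, h3⟩
      exact ⟨by exact_mod_cast h1, by exact_mod_cast h2, (pv_dvd_shift p k).mpr h3⟩
  by_cases hc : p * p ≤ k ∧ k < nn ∧ p ∣ k
  · rw [if_pos ⟨hmem.mpr hc, hc.2.1⟩, if_pos hc]
  · rw [if_neg (fun hx => hc (hmem.mp hx.1)), if_neg hc]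

def pvLpfFin (k : Nat) : Int := if 2 ≤ k then ((k.minFac : Nat) : Int) else 0

theorem pvLpfModel_some (i k q : Nat) (h : pvLQ i k = some q) : pvLpfModel i k = (q : Int) := by
  unfold pvLpfModel; rw [h]

theorem pvLpfModel_none (i k : Nat) (h : pvLQ i k = none) :
    pvLpfModel i k = if k = 1 then 0 else (k : Int) := by
  unfold pvLpfModel; rw [h]

theorem pvLQ_succ_some (i k q : Nat) (h : pvLQ i k = some q) : pvLQ (i + 1) k = some q := by
  rw [pvLQ, h]

theorem pvLpfModel_succ (i k : Nat)
    (hc : ¬(Nat.Prime (i + 1) ∧ (i + 1) ∣ k ∧ (i + 1) * (i + 1) ≤ k)) :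
    pvLpfModel (i + 1) k = pvLpfModel i k := by
  unfold pvLpfModel
  rw [pvLQ]
  cases h : pvLQ i k with
  | some q => rfl
  | none => rw [if_neg hc]

theorem pvLpfModel_fin (i k nn : Nat) (hk : k < nn) (hnn : nn ≤ i * i + 1) :
    pvLpfModel i k = pvLpfFin k := by
  unfold pvLpfModel pvLpfFin
  rcases Nat.lt_or_ge k 2 with h2 | h2
  · have hnone : pvLQ i k = none := by
      rw [pvLQ_none_iff]
      rintro q hq ⟨hp, hd, hsq⟩
      have := hp.two_le
      interval_cases k
      · nlinarith
      · have := Nat.le_of_dvd (by omega) hd; omega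
    rw [hnone]
    interval_cases k <;> simp
  · by_cases hpk : Nat.Prime k
    · have hnone : pvLQ i k = none := by
        rw [pvLQ_none_iff]
        rintro q hq ⟨hp, hd, hsq⟩
        exact pv_prime_no_small k q hpk hp hd hsq
      rw [hnone, if_neg (by omega), if_pos h2, hpk.minFac_eq]
    · have hq0p : Nat.Prime k.minFac := Nat.minFac_prime (by omega)
      have hq0sq : k.minFac * k.minFac ≤ k := by
        simpa [pow_two] using Nat.minFac_sq_le_self (by omega : 0 < k) hpk
      have hq0i : k.minFac ≤ i := by
        have h2q := hq0p.two_le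
        by_contra hgt
        have h1 : (i + 1) * (i + 1) ≤ k.minFac * k.minFac := Nat.mul_le_mul (by omega) (by omega)
        nlinarith
      cases hq : pvLQ i k with
      | none =>
        exact absurd ((pvLQ_none_iff i k).mp hq k.minFac hq0i
          ⟨hq0p, Nat.minFac_dvd k, hq0sq⟩) (fun h => h)
      | some q =>
        obtain ⟨hqp, hqd, hqsq, -, hmin⟩ := pvLQ_some_min i k q hq
        have h1 : q ≤ k.minFac := hmin _ hq0p (Nat.minFac_dvd k) hq0sq
        have h2' : k.minFac ≤ q := Nat.minFac_le_of_dvd hqp.two_le hqd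
        have : q = k.minFac := by omega
        rw [this, if_pos h2]

theorem pvLpfLoop_inv (nn : Nat) (isp : List Bool) (hnn : 2 ≤ nn)
    (hisp : ∀ k, k < nn → (isp.getD k false = true ↔ Nat.Prime k)) :
    ∀ (i : Nat) (lpf : List Int), pvInvL nn i lpf →
      (pvLpfLoop nn isp i lpf).length = nn ∧
        ∀ k, k < nn → (pvLpfLoop nn isp i lpf).getD k 0 = pvLpfFin k := by
  intro i lpf hinv
  induction i, lpf using pvLpfLoop.induct nn isp with
  | case1 i lpf h hskip ih =>
    rw [pvLpfLoop, dif_pos h, if_pos hskip]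
    apply ih
    obtain ⟨hlen, hch⟩ := hinv
    have hi1 : i + 1 < nn := by
      rcases Nat.eq_zero_or_pos i with rfl | hp
      · omega
      · have := Nat.le_mul_of_pos_left i hp; omega
    have hnp : ¬ Nat.Prime (i + 1) := by
      intro hp
      have := (hisp (i + 1) hi1).mpr hp
      rw [hskip] at this
      exact Bool.false_ne_true this
    refine ⟨hlen, fun k hk => ?_⟩
    rw [hch k hk, pvLpfModel_succ i k (by tauto)]
  | case2 i lpf h hmark ih =>
    rw [pvLpfLoop, dif_pos h, if_neg hmark]
    apply ih
    obtain ⟨hlen, hch⟩ := hinv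
    have hi1 : i + 1 < nn := by
      rcases Nat.eq_zero_or_pos i with rfl | hp
      · omega
      · have := Nat.le_mul_of_pos_left i hp; omega
    have htrue : isp.getD (i + 1) false = true := by
      cases hv : isp.getD (i + 1) false
      · exact absurd hv hmark
      · rfl
    have hp1 : Nat.Prime (i + 1) := (hisp (i + 1) hi1).mp htrue
    have hp2 := hp1.two_le
    constructor
    · unfold pvLpfMark
      rw [pv_len_foldl_setif, hlen]
    · intro k hk
      rw [pv_lmark_getD nn (i + 1) k lpf (by omega) hlen]
      by_cases hc : (i + 1) * (i + 1) ≤ k ∧ k < nn ∧ (i + 1) ∣ k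
      · rw [if_pos hc, hch k hk]
        have hik : i + 1 ≤ k := le_trans (Nat.le_mul_of_pos_left (i + 1) (by omega)) hc.1
        have hk4 : 4 ≤ k := by nlinarith [hc.1]
        cases hq : pvLQ i k with
        | some q =>
          obtain ⟨hqp, hqd, hqsq, hqi, -⟩ := pvLQ_some_min i k q hq
          rw [pvLpfModel_some i k q hq, pvLpfModel_some (i + 1) k q (pvLQ_succ_some i k q hq)]
          rw [if_neg ?_]
          intro hcast
          have : q = k := by exact_mod_cast hcast
          omega
        | none =>
          rw [pvLpfModel_none i k hq, if_neg (by omega : ¬ k = 1), if_pos rfl,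
            pvLpfModel_some (i + 1) k (i + 1) (by rw [pvLQ, hq, if_pos ⟨hp1, hc.2.2, hc.1⟩])]
      · rw [if_neg hc, hch k hk, pvLpfModel_succ i k (by tauto)]
  | case3 i lpf h =>
    rw [pvLpfLoop, dif_neg h]
    obtain ⟨hlen, hch⟩ := hinv
    refine ⟨hlen, fun k hk => ?_⟩
    rw [hch k hk, pvLpfModel_fin i k nn hk (by omega)]

theorem pvLpf_entries (nn : Nat) (hnn : 2 ≤ nn) :
    (pvLeastPrimeFactor nn).length = nn ∧
      ∀ k, k < nn → (pvLeastPrimeFactor nn).getD k 0 = pvLpfFin k := by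
  unfold pvLeastPrimeFactor
  apply pvLpfLoop_inv nn _ hnn (pvSieveA_prime nn hnn)
  constructor
  · rw [List.length_set, PySem.List.length_pyRange_one]
    omega
  · intro k hk
    have hmodel : pvLpfModel 0 k = if k = 1 then 0 else (k : Int) := by
      unfold pvLpfModel
      rw [show pvLQ 0 k = none from rfl]
    rw [hmodel]
    have hlen : k < (PySem.List.pyRange 0 nn 1).length := by
      rw [PySem.List.length_pyRange_one]; omega
    by_cases h1 : k = 1
    · subst h1
      rw [List.getD_eq_getElem _ _ (by simpa using hlen)]
      rw [if_pos rfl]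
      rw [List.getElem_set_self]  -- may need length side condition
    · rw [List.getD_eq_getElem _ _ (by simpa using hlen), if_neg h1]
      rw [List.getElem_set_ne (by omega)]
      rw [PySem.List.getElem_pyRange_one]
      omega

theorem pv_dvd_shift1 (i k : Nat) : ((i : Int) ∣ (k : Int) - i) ↔ (i ∣ k) := by
  constructor
  · intro h
    have h2 : (i : Int) ∣ ((k : Int) - i) + i := dvd_add h dvd_rfl
    rw [sub_add_cancel] at h2
    exact_mod_cast h2
  · intro h
    have h1 : (i : Int) ∣ (k : Int) := by exact_mod_cast h
    exact dvd_sub h1 dvd_rfl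

theorem pv_getD_set_self (g : List Int) (t : Nat) (v : Int) (h : t < g.length) :
    (g.set t v).getD t 0 = v := by
  simp [List.getD_eq_getElem?_getD, List.getElem?_set_self h]

theorem pv_getD_set_ne (g : List Int) (t k : Nat) (v : Int) (h : k ≠ t) :
    (g.set t v).getD k 0 = g.getD k 0 := by
  simp [List.getD_eq_getElem?_getD, List.getElem?_set_ne (by omega : t ≠ k)]

-- ===== A's gpf loop =====
theorem pvA_loop (nn : Nat) (lpf : List Int)
    (hlpf : ∀ k, k < nn → lpf.getD k 0 = pvLpfFin k) :
    ∀ (fuel t : Nat) (g : List Int), nn - t = fuel → 2 ≤ t → t ≤ nn → g.length = nn →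
      (∀ k, k < nn →
        g.getD k 0 = if k < t then (pvGB (k + 1) k : Int) else (if k = 1 then 0 else (k : Int))) →
      (((PySem.List.pyRange (t : Int) (nn : Int) 1).foldl
          (fun g i =>
            if lpf.getD i.toNat 0 = i then g
            else g.set i.toNat (g.getD (PySem.Int.floordiv i (lpf.getD i.toNat 0)).toNat 0)) g).length = nn ∧
       ∀ k, k < nn →
        ((PySem.List.pyRange (t : Int) (nn : Int) 1).foldl
          (fun g i =>
            if lpf.getD i.toNat 0 = i then g
            else g.set i.toNat (g.getD (PySem.Int.floordiv i (lpf.getD i.toNat 0)).toNat 0)) g).getD k 0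
          = (pvGB (k + 1) k : Int)) := by
  intro fuel
  induction fuel with
  | zero =>
    intro t g hfuel h2 htn hlen hinv
    have : t = nn := by omega
    subst this
    rw [PySem.List.pyRange_one_eq_nil le_rfl]
    refine ⟨hlen, fun k hk => ?_⟩
    have := hinv k hk
    rw [if_pos hk] at this
    simpa using this
  | succ fuel ih =>
    intro t g hfuel h2 htn hlen hinv
    have htlt : t < nn := by omega
    rw [PySem.List.pyRange_one_cons (by exact_mod_cast htlt), List.foldl_cons]
    have htoNat : ((t : Int)).toNat = t := by simp
    have hlval : lpf.getD t 0 = ((t.minFac : Nat) : Int) := by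
      rw [hlpf t htlt]
      unfold pvLpfFin
      rw [if_pos h2]
    by_cases hpt : Nat.Prime t
    · -- lpf[t] = t: skip
      have hcond : lpf.getD ((t : Int)).toNat 0 = (t : Int) := by
        rw [htoNat, hlval, hpt.minFac_eq]
      rw [if_pos hcond]
      have hcons : ((t : Int) + 1) = ((t + 1 : Nat) : Int) := by push_cast; ring
      rw [hcons]
      apply ih (t + 1) g (by omega) (by omega) (by omega) hlen
      intro k hk
      rw [hinv k hk]
      by_cases hkt : k < t
      · rw [if_pos hkt, if_pos (by omega)]
      · by_cases hke : k = t
        · rw [if_neg hkt, if_pos (show k < t + 1 by omega), if_neg (show ¬ k = 1 by omega), hke,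
            pvGB_prime t hpt]
        · rw [if_neg hkt, if_neg (show ¬ k = 1 by omega), if_neg (show ¬ k < t + 1 by omega)]
    · -- composite t: gpf[t] = gpf[t // lpf[t]]
      have hq0p : Nat.Prime t.minFac := Nat.minFac_prime (by omega)
      have hq02 := hq0p.two_le
      have hq0sq : t.minFac * t.minFac ≤ t := by
        simpa [pow_two] using Nat.minFac_sq_le_self (by omega : 0 < t) hpt
      have hq0lt : t.minFac < t := by nlinarith
      have hcond : ¬ (lpf.getD ((t : Int)).toNat 0 = (t : Int)) := by
        rw [htoNat, hlval]
        intro hx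
        have : t.minFac = t := by exact_mod_cast hx
        omega
      rw [if_neg hcond, htoNat, hlval]
      have hfd : PySem.Int.floordiv (t : Int) ((t.minFac : Nat) : Int)
          = ((t / t.minFac : Nat) : Int) := PySem.Int.floordiv_natCast t t.minFac
      rw [hfd]
      set d := t / t.minFac with hdd
      have hd2 : t.minFac ≤ d := (Nat.le_div_iff_mul_le hq0p.pos).mpr hq0sq
      have hdlt : d < t := Nat.div_lt_self (by omega) hq0p.one_lt
      have hdn : ((d : Int)).toNat = d := by simp
      rw [hdn]
      have hdval : g.getD d 0 = (pvGB (d + 1) d : Int) := by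
        rw [hinv d (by omega), if_pos (by omega)]
      rw [hdval]
      have hcons : ((t : Int) + 1) = ((t + 1 : Nat) : Int) := by push_cast; ring
      rw [hcons]
      apply ih (t + 1) _ (by omega) (by omega) (by omega) (by rw [List.length_set]; omega)
      intro k hk
      by_cases hke : k = t
      · subst hke
        rw [pv_getD_set_self g k _ (by omega), if_pos (show k < k + 1 by omega)]
        rw [← pvGB_comp k h2 hpt]
      · rw [pv_getD_set_ne g t k _ hke, hinv k hk]
        by_cases hkt : k < t
        · rw [if_pos hkt, if_pos (by omega)]
        · rw [if_neg hkt, if_neg (show ¬ k = 1 by omega), if_neg (show ¬ k < t + 1 by omega)]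

def pvSpec (N : Nat) : List Int := (List.range N).map fun k => (pvGB N k : Int)

theorem pvA_eq_spec (n : Int) (hn : 1 < n) : greatest_prime_factor n = pvSpec n.toNat := by
  obtain ⟨nn, rfl⟩ : ∃ m : Nat, n = (m : Int) := ⟨n.toNat, by omega⟩
  have hn2 : 2 ≤ nn := by exact_mod_cast hn
  rw [Int.toNat_natCast]
  simp only [greatest_prime_factor, Int.toNat_natCast]
  obtain ⟨hlplen, hlpf⟩ := pvLpf_entries nn hn2
  have hinit : ∀ k, k < nn →
      (((PySem.List.pyRange 0 nn 1).set 1 0).getD k 0)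
        = if k < 2 then (pvGB (k + 1) k : Int) else (if k = 1 then 0 else (k : Int)) := by
    intro k hk
    have hlen : k < (PySem.List.pyRange 0 (nn : Int) 1).length := by
      rw [PySem.List.length_pyRange_one]; omega
    by_cases h1 : k = 1
    · subst h1
      rw [List.getD_eq_getElem _ _ (by simpa using hlen), List.getElem_set_self]
      norm_num
    · rw [List.getD_eq_getElem _ _ (by simpa using hlen), List.getElem_set_ne (by omega),
        PySem.List.getElem_pyRange_one]
      rcases Nat.lt_or_ge k 2 with h2 | h2
      · have hk0 : k = 0 := by omega
        subst hk0
        norm_num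
      · rw [if_neg (by omega), if_neg h1]
        omega
  have h := pvA_loop nn (pvLeastPrimeFactor nn) hlpf (nn - 2) 2
    ((PySem.List.pyRange 0 nn 1).set 1 0) rfl le_rfl (by omega)
    (by rw [List.length_set, PySem.List.length_pyRange_one]; omega) hinit
  rw [show (((2 : Nat) : Int)) = (2 : Int) by norm_num] at h
  obtain ⟨hlen, hent⟩ := h
  apply List.ext_getElem
  · rw [hlen]
    simp [pvSpec]
  · intro k hk1 hk2
    have hk : k < nn := by rwa [hlen] at hk1
    have h1 : _ = _ := List.getD_eq_getElem _ 0 hk1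
    rw [← h1, hent k hk]
    simp only [pvSpec, List.getElem_map, List.getElem_range]
    rw [pvGB_stab nn k hk]

-- ===== B's sieve loop =====
theorem pvB_sieve_loop (nn : Nat) :
    ∀ (fuel t : Nat) (a : List Bool), nn - t = fuel → 2 ≤ t → t ≤ nn → a.length = nn →
      (∀ k, k < nn → (a.getD k false = true ↔ 2 ≤ k ∧ pvNoQ (t - 1) k)) →
      (((PySem.List.pyRange (t : Int) (nn : Int) 1).foldl
          (fun a p =>
            if a.getD p.toNat false then
              (PySem.List.pyRange (p * p) nn p).foldl (fun a2 j => a2.set j.toNat false) a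
            else a) a).length = nn ∧
       ∀ k, k < nn →
        (((PySem.List.pyRange (t : Int) (nn : Int) 1).foldl
          (fun a p =>
            if a.getD p.toNat false then
              (PySem.List.pyRange (p * p) nn p).foldl (fun a2 j => a2.set j.toNat false) a
            else a) a).getD k false = true ↔ Nat.Prime k)) := by
  intro fuel
  induction fuel with
  | zero =>
    intro t a hfuel h2 htn hlen hinv
    have : t = nn := by omega
    subst this
    rw [PySem.List.pyRange_one_eq_nil le_rfl, List.foldl_nil]
    refine ⟨hlen, fun k hk => ?_⟩
    rw [hinv k hk]
    constructor
    · rintro ⟨hk2, hno⟩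
      exact pv_entry_prime (t - 1) k hk2 (by omega) hno
    · intro hp
      refine ⟨hp.two_le, fun q hq ⟨hqp, hqd, hqsq⟩ => pv_prime_no_small k q hp hqp hqd hqsq⟩
  | succ fuel ih =>
    intro t a hfuel h2 htn hlen hinv
    have htlt : t < nn := by omega
    rw [PySem.List.pyRange_one_cons (by exact_mod_cast htlt), List.foldl_cons]
    have htoNat : ((t : Int)).toNat = t := by simp
    have hread : (a.getD ((t : Int)).toNat false = true) ↔ Nat.Prime t := by
      rw [htoNat, hinv t htlt]
      constructor
      · rintro ⟨hk2, hno⟩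
        exact pv_entry_prime (t - 1) t hk2 (by omega) hno
      · intro hp
        refine ⟨hp.two_le, fun q hq ⟨hqp, hqd, hqsq⟩ => pv_prime_no_small t q hp hqp hqd hqsq⟩
    have hst : t - 1 + 1 = t := by omega
    have hcons : ((t : Int) + 1) = ((t + 1 : Nat) : Int) := by push_cast; ring
    by_cases hpt : Nat.Prime t
    · rw [if_pos (hread.mpr hpt)]
      rw [hcons]
      apply ih (t + 1) _ (by omega) (by omega) (by omega)
      · rw [pv_len_foldl_set]
        exact hlen
      · intro k hk
        rw [pv_mark_getD nn t k a (by omega) hlen]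
        by_cases hc : t * t ≤ k ∧ k < nn ∧ t ∣ k
        · rw [if_pos hc]
          simp only [Bool.false_eq_true, false_iff]
          rintro ⟨-, hnoq⟩
          rw [show t + 1 - 1 = t from rfl] at hnoq
          rw [← hst] at hnoq
          rw [pvNoQ_succ] at hnoq
          rw [hst] at hnoq
          exact hnoq.2 ⟨hpt, hc.2.2, hc.1⟩
        · rw [if_neg hc, hinv k hk]
          rw [show t + 1 - 1 = t from rfl, ← hst, pvNoQ_succ, hst]
          constructor
          · rintro ⟨hk2, hno⟩
            refine ⟨hk2, hno, ?_⟩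
            rintro ⟨-, hd, hsq⟩
            exact hc ⟨hsq, hk, hd⟩
          · rintro ⟨hk2, hno, -⟩
            exact ⟨hk2, hno⟩
    · rw [if_neg (by rw [hread]; exact hpt)]
      rw [hcons]
      apply ih (t + 1) _ (by omega) (by omega) (by omega) hlen
      intro k hk
      rw [hinv k hk]
      rw [show t + 1 - 1 = t from rfl, ← hst, pvNoQ_succ, hst]
      tauto

theorem pv_gmark_getD (nn t k : Nat) (g : List Int) (hp : 0 < t) (hlen : g.length = nn) :
    (((PySem.List.pyRange ((t : Int)) nn t).foldl (fun g2 j => g2.set j.toNat ((t : Int))) g)).getD k 0 =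
      if t ≤ k ∧ k < nn ∧ t ∣ k then ((t : Int)) else g.getD k 0 := by
  rw [pv_getD_foldl_set]
  rw [hlen]
  have hmem : ((k : Int) ∈ PySem.List.pyRange (t : Int) nn t) ↔ (t ≤ k ∧ k < nn ∧ t ∣ k) := by
    rw [PySem.List.mem_pyRange_iff_of_pos (by exact_mod_cast hp)]
    constructor
    · rintro ⟨h1, h2, h3⟩
      exact ⟨by exact_mod_cast h1, by exact_mod_cast h2, (pv_dvd_shift1 t k).mp h3⟩
    · rintro ⟨h1, h2, h3⟩
      exact ⟨by exact_mod_cast h1, by exact_mod_cast h2, (pv_dvd_shift1 t k).mpr h3⟩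
  by_cases hc : t ≤ k ∧ k < nn ∧ t ∣ k
  · rw [if_pos ⟨⟨(k : Int), hmem.mpr hc, by simp⟩, hc.2.1⟩, if_pos hc]
  · rw [if_neg (fun hx => hc (hmem.mp
      ((pv_mem_pyRange_toNat _ _ _ _ (by positivity) (by exact_mod_cast hp)).mp hx.1))), if_neg hc]

theorem pvGB_two (k : Nat) : pvGB 2 k = 0 := by
  simp [pvGB, Nat.not_prime_one, Nat.not_prime_zero]

theorem pvB_gpf_loop (nn : Nat) (isp : List Bool)
    (hisp : ∀ k, k < nn → (isp.getD k false = true ↔ Nat.Prime k)) :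
    ∀ (fuel t : Nat) (g : List Int), nn - t = fuel → 2 ≤ t → t ≤ nn → g.length = nn →
      (∀ k, k < nn → g.getD k 0 = (pvGB t k : Int)) →
      (((PySem.List.pyRange (t : Int) (nn : Int) 1).foldl
          (fun g p =>
            if isp.getD p.toNat false then
              (PySem.List.pyRange p nn p).foldl (fun g2 j => g2.set j.toNat p) g
            else g) g).length = nn ∧
       ∀ k, k < nn →
        ((PySem.List.pyRange (t : Int) (nn : Int) 1).foldl
          (fun g p =>
            if isp.getD p.toNat false then
              (PySem.List.pyRange p nn p).foldl (fun g2 j => g2.set j.toNat p) g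
            else g) g).getD k 0 = (pvGB nn k : Int)) := by
  intro fuel
  induction fuel with
  | zero =>
    intro t g hfuel h2 htn hlen hinv
    have : t = nn := by omega
    subst this
    rw [PySem.List.pyRange_one_eq_nil le_rfl, List.foldl_nil]
    exact ⟨hlen, hinv⟩
  | succ fuel ih =>
    intro t g hfuel h2 htn hlen hinv
    have htlt : t < nn := by omega
    rw [PySem.List.pyRange_one_cons (by exact_mod_cast htlt), List.foldl_cons]
    have htoNat : ((t : Int)).toNat = t := by simp
    have hread : (isp.getD ((t : Int)).toNat false = true) ↔ Nat.Prime t := by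
      rw [htoNat]
      exact hisp t htlt
    have hcons : ((t : Int) + 1) = ((t + 1 : Nat) : Int) := by push_cast; ring
    by_cases hpt : Nat.Prime t
    · rw [if_pos (hread.mpr hpt), hcons]
      apply ih (t + 1) _ (by omega) (by omega) (by omega)
      · rw [pv_len_foldl_set]
        exact hlen
      · intro k hk
        rw [pv_gmark_getD nn t k g (by omega) hlen]
        rw [pvGB]
        by_cases hc : t ≤ k ∧ k < nn ∧ t ∣ k
        · rw [if_pos hc, if_pos ⟨hpt, hc.2.2, hc.1⟩]
        · rw [if_neg hc, if_neg (by tauto), hinv k hk]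
    · rw [if_neg (by rw [hread]; exact hpt), hcons]
      apply ih (t + 1) _ (by omega) (by omega) (by omega) hlen
      intro k hk
      rw [hinv k hk, pvGB, if_neg (by tauto)]

theorem pvNoQ_one (k : Nat) : pvNoQ 1 k := by
  rintro q hq ⟨hp, -, -⟩
  have := hp.two_le
  omega

theorem pv_init_getD (nn k : Nat) (_hnn : 2 ≤ nn) (hk : k < nn) :
    ((((List.replicate nn true).set 0 false).set 1 false).getD k false = true) ↔ 2 ≤ k := by
  rcases Nat.lt_or_ge k 2 with h2 | h2
  · have he : (((List.replicate nn true).set 0 false).set 1 false).getD k false = false := by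
      interval_cases k <;>
        simp [List.getD_eq_getElem?_getD, (by omega : 0 < nn), (by omega : 1 < nn)]
    rw [he]
    simp only [Bool.false_eq_true, false_iff]
    omega
  · have he : (((List.replicate nn true).set 0 false).set 1 false).getD k false = true := by
      rw [List.getD_eq_getElem?_getD, List.getElem?_set_ne (by omega : (1 : Nat) ≠ k),
        List.getElem?_set_ne (by omega : (0 : Nat) ≠ k)]
      simp [hk]
    rw [he]
    simp [h2]

theorem pvB_eq_spec (n : Int) (hn : 1 < n) : greatest_prime_factor_alt n = pvSpec n.toNat := by
  obtain ⟨nn, rfl⟩ : ∃ m : Nat, n = (m : Int) := ⟨n.toNat, by omega⟩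
  have hn2 : 2 ≤ nn := by exact_mod_cast hn
  rw [Int.toNat_natCast]
  simp only [greatest_prime_factor_alt, Int.toNat_natCast]
  have hsieve := pvB_sieve_loop nn (nn - 2) 2
    (((List.replicate nn true).set 0 false).set 1 false) rfl le_rfl (by omega)
    (by simp)
    (by
      intro k hk
      rw [pv_init_getD nn k hn2 hk]
      constructor
      · intro h2
        exact ⟨h2, by have : (2 : Nat) - 1 = 1 := rfl; rw [this]; exact pvNoQ_one k⟩
      · rintro ⟨h2, -⟩
        exact h2)
  rw [show (((2 : Nat) : Int)) = (2 : Int) by norm_num] at hsieve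
  obtain ⟨hslen, hsent⟩ := hsieve
  have hgpf := pvB_gpf_loop nn _ hsent (nn - 2) 2 (List.replicate nn (0 : Int)) rfl le_rfl
    (by omega) (by simp)
    (by
      intro k hk
      rw [pvGB_two]
      simp [List.getD_eq_getElem?_getD, hk])
  rw [show (((2 : Nat) : Int)) = (2 : Int) by norm_num] at hgpf
  obtain ⟨hlen, hent⟩ := hgpf
  apply List.ext_getElem
  · exact hlen.trans (by simp [pvSpec])
  · intro k hk1 hk2
    have hk : k < nn := lt_of_lt_of_eq hk1 hlen
    calc _ = _ := (List.getD_eq_getElem _ (0 : Int) hk1).symm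
      _ = (pvGB nn k : Int) := hent k hk
      _ = _ := by simp [pvSpec]

-- ===== VERDICT (by name: the statement is the Claim_ definition above) =====
theorem greatest_prime_factor_spec : Claim_equal_greatest_prime_factor := by
  intro n _ hpre
  unfold Spec_greatest_prime_factor
  rw [pvA_eq_spec n hpre, pvB_eq_spec n hpre]
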